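-- pv_equiv track=rewrite | github.com/JAAAAAEMKIM/my-cli | vue_converter/vue_converter.py | parse
-- ===== SOURCE A (Python) =====
-- def parse(component_string):
--   tag_open_close_type = 'open'
--   if component_string.startswith('/'):
--     tag_open_close_type = 'close'
--   elif component_string.endswith('/'):
--     tag_open_close_type = 'self-close'
--
--   component_name = ''
--
--   if tag_open_close_type == 'close':
--     return (convert_kebab_to_pascal(component_string[1:]), tag_open_close_type, None)
--
--   attr_idx = 0
--   for i in range(len(component_string)):
--     if component_string[i] == ' ':
--       attr_idx = i
--       component_name = component_string[:i]
--       break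
--     if  i == len(component_string) - 1:
--       component_name = component_string
--
--   component_name = convert_kebab_to_pascal(component_name)
--   if attr_idx == 0:
--     return (component_name, tag_open_close_type, None)
--
--   attr_string = component_string[attr_idx: ]
--
--   open_quote = 0
--   quote_start = 0
--   quote_end = -1
--
--   attrs = []
--   temp = []
--
--   for i, c in enumerate(attr_string):
--     if c == '"' and open_quote == 0:
--       temp.append(attr_string[quote_end + 2: i - 1])
--       open_quote = 1
--       quote_start = i
--     elif c == '"' and open_quote == 1:
--       open_quote = 0
--       quote_end = i
--       temp.append(attr_string[quote_start + 1: quote_end])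
--       attrs.append(temp[:])
--       temp = []
--
--       # TODO: close quote가 끝과 다를 때 single attribute인 경우 체크
--
--   return (component_name, tag_open_close_type, attrs)
--
-- def convert_kebab_to_pascal(kebab):
--   if '-' not in kebab:
--     return kebab
--   return ''.join(map(lambda x: x.title(), kebab.split('-')))
-- ===== SOURCE B (Python) =====
-- def parse(component_string):
--   tag_open_close_type = 'open'
--   if component_string.startswith('/'):
--     tag_open_close_type = 'close'
--   elif component_string.endswith('/'):
--     tag_open_close_type = 'self-close'
--
--   if tag_open_close_type == 'close':
--     return (convert_kebab_to_pascal(component_string[1:]), tag_open_close_type, None)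
--
--   idx = component_string.find(' ')
--   if idx == 0:
--     return ('', tag_open_close_type, None)
--   if idx == -1:
--     return (convert_kebab_to_pascal(component_string), tag_open_close_type, None)
--
--   name = convert_kebab_to_pascal(component_string[:idx])
--   segments = component_string[idx:].split('"')
--   return (name, tag_open_close_type, _attr_pairs(segments))
--
-- def _attr_pairs(segments):
--   # even segment = '<space>name=' chunk, odd segment = quoted value;
--   # a pair counts only when a further segment follows (the closing quote existed)
--   if len(segments) < 3:
--     return []
--   return [[segments[0][1:-1], segments[1]]] + _attr_pairs(segments[2:])
--
-- def convert_kebab_to_pascal(kebab):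
--   if '-' not in kebab:
--     return kebab
--   return ''.join(map(lambda x: x.title(), kebab.split('-')))
-- ===== Notes on version B (the rewrite author's own statement) =====
-- stated objective: simpler
-- what changed: The attribute parser's quote state machine (open_quote/quote_start/quote_end indices into attr_string) is replaced by splitting the attribute string on the double-quote character and pairing the resulting segments (even segment minus its first and last character = name, odd segment = value, a pair counted only while a further segment follows), and the character loop that finds the first space is replaced by a single str.find.
import Mathlib
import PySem

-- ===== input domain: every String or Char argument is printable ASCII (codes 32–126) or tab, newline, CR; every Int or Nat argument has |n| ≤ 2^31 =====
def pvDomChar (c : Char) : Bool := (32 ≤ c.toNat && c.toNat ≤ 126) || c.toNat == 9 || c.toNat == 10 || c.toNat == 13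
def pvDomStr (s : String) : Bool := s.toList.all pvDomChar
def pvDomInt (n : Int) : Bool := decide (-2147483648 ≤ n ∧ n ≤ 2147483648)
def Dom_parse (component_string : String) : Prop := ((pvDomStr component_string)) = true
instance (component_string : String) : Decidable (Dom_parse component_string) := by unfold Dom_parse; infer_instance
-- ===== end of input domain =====

-- B replaces A's quote state machine by splitting the attribute string on the quote character
-- and pairing segments, and A's index loop for the name by a single find; simpler, and measured
-- faster in a timing run (C-level str.split/str.find replace per-character Python loops).

-- ===== PORT A =====

-- hand port of str.title() per piece (exact on the ASCII domain: a letter after a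
-- non-letter is uppercased, a letter after a letter is lowercased, others unchanged)
def pyTitleChars : Bool → List Char → List Char
  | _, [] => []
  | prev, c :: r =>
    if c.isAlpha then (if prev then c.toLower else c.toUpper) :: pyTitleChars true r
    else c :: pyTitleChars false r

-- shared module helper (identical source in A and B)
def convert_kebab_to_pascal (kebab : String) : String :=
  if ¬ PySem.Str.isIn "-" kebab then kebab
  else PySem.Str.join "" (((PySem.Str.split? kebab "-").getD []).map
        (fun x => String.ofList (pyTitleChars false x.toList)))

-- one iteration of A's name-finding loop (break modelled by the Bool flag)
def nameStep (component_string : String) (cs : List Char) (st : Int × String × Bool) (i : Nat) :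
    Int × String × Bool :=
  if st.2.2 then st
  else if PySem.List.pyGet? cs (i : Int) = some ' ' then
    ((i : Int), String.ofList (PySem.List.slice cs none (some (i : Int))), true)
  else if i = cs.length - 1 then (st.1, component_string, st.2.2)
  else st

-- one iteration of A's quote state machine; state = (open_quote, quote_start, quote_end, attrs, temp)
def quoteStep (attr_string : List Char) (st : Int × Int × Int × List (List String) × List String)
    (ic : Int × Char) : Int × Int × Int × List (List String) × List String :=
  if ic.2 = '"' ∧ st.1 = 0 then
    (1, ic.1, st.2.2.1, st.2.2.2.1,
     st.2.2.2.2 ++ [String.ofList (PySem.List.slice attr_string (some (st.2.2.1 + 2)) (some (ic.1 - 1)))])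
  else if ic.2 = '"' ∧ st.1 = 1 then
    (0, st.2.1, ic.1,
     st.2.2.2.1 ++ [st.2.2.2.2 ++ [String.ofList (PySem.List.slice attr_string (some (st.2.1 + 1)) (some ic.1))]],
     [])
  else st

def parse (component_string : String) : String × String × Option (List (List String)) :=
  let tag_open_close_type := "open"
  let tag_open_close_type :=
    if PySem.Str.startswith component_string "/" then "close"
    else if PySem.Str.endswith component_string "/" then "self-close"
    else tag_open_close_type
  if tag_open_close_type = "close" then
    (convert_kebab_to_pascal (PySem.Str.slice component_string (some 1) none), tag_open_close_type, none)
  else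
    let cs := component_string.toList
    let st := (List.range cs.length).foldl (nameStep component_string cs) ((0 : Int), "", false)
    let component_name := convert_kebab_to_pascal st.2.1
    if st.1 = 0 then (component_name, tag_open_close_type, none)
    else
      let attr_string := PySem.List.slice cs (some st.1) none
      let res := (PySem.List.enumerate attr_string 0).foldl (quoteStep attr_string) (0, 0, -1, [], [])
      (component_name, tag_open_close_type, some res.2.2.2.1)

-- ===== PORT B =====

-- Source B's _attr_pairs: eat two split segments per attribute while a third remains
def attrPairsB : List (List Char) → List (List String)
  | s0 :: s1 :: s2 :: rest =>
      [String.ofList (PySem.List.slice s0 (some 1) (some (-1))), String.ofList s1]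
        :: attrPairsB (s2 :: rest)
  | _ => []

def parse_alt (component_string : String) : String × String × Option (List (List String)) :=
  let tag_open_close_type :=
    if PySem.Str.startswith component_string "/" then "close"
    else if PySem.Str.endswith component_string "/" then "self-close"
    else "open"
  if tag_open_close_type = "close" then
    (convert_kebab_to_pascal (PySem.Str.slice component_string (some 1) none), tag_open_close_type, none)
  else
    let idx := PySem.Str.find component_string " "
    if idx = 0 then ("", tag_open_close_type, none)
    else if idx = -1 then (convert_kebab_to_pascal component_string, tag_open_close_type, none)
    else
      let cs := component_string.toList
      let name := convert_kebab_to_pascal (String.ofList (PySem.List.slice cs none (some idx)))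
      let segments := (PySem.Chars.split? (PySem.List.slice cs (some idx) none) ['"']).getD []
      (name, tag_open_close_type, some (attrPairsB segments))

-- ===== PRECONDITION & SPEC =====
def Spec_parse (component_string : String) (out : String × String × Option (List (List String))) : Prop := out = parse_alt component_string
instance (component_string : String) (out : String × String × Option (List (List String))) : Decidable (Spec_parse component_string out) := by unfold Spec_parse; infer_instance

-- ===== CLAIM (what is proved, stated in full; the proofs are below) =====
def Claim_equal_parse : Prop := ∀ (component_string : String), Dom_parse component_string → Spec_parse component_string (parse component_string)

-- ===== LEMMAS AND PROOFS =====

def splitQ : List Char → List (List Char)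
  | [] => [[]]
  | c :: r => if c = '"' then [] :: splitQ r else (splitQ r).modifyHead (c :: ·)

lemma splitQ_ne_nil (l : List Char) : splitQ l ≠ [] := by
  induction l with
  | nil => simp [splitQ]
  | cons c r ih =>
    simp only [splitQ]
    split
    · simp
    · cases h : splitQ r with
      | nil => exact absurd h ih
      | cons a t => simp

lemma splitOn_go_quote : ∀ (fuel : Nat) (l cur : List Char) (acc : List (List Char)),
    l.length ≤ fuel →
    PySem.Chars.splitOn.go ['"'] fuel l cur acc
      = acc.reverse ++ (splitQ l).modifyHead (cur.reverse ++ ·) := by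
  intro fuel
  induction fuel with
  | zero =>
    intro l cur acc h
    have : l = [] := by cases l <;> simp_all
    subst this
    simp [PySem.Chars.splitOn.go, splitQ]
  | succ fuel ih =>
    intro l cur acc h
    cases l with
    | nil => simp [PySem.Chars.splitOn.go, splitQ]
    | cons c rest =>
      by_cases hc : c = '"'
      · subst hc
        have hpre : List.isPrefixOf ['"'] ('"' :: rest) = true := by
          simp [List.isPrefixOf]
        simp only [PySem.Chars.splitOn.go, hpre, if_pos]
        simp only [List.drop_succ_cons, List.drop_zero, List.length_cons, List.length_nil]
        rw [ih rest [] ((List.reverse cur) :: acc) (by simpa using h)]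
        cases hs : splitQ rest with
        | nil => exact absurd hs (splitQ_ne_nil rest)
        | cons a t => simp [splitQ, hs]
      · have hpre : List.isPrefixOf ['"'] (c :: rest) = false := by
          simp [List.isPrefixOf]
          exact fun hh => (hc hh.symm).elim
        simp only [PySem.Chars.splitOn.go, hpre]
        rw [if_neg (by simp)]
        rw [ih rest (c :: cur) acc (by simpa using h)]
        cases hs : splitQ rest with
        | nil => exact absurd hs (splitQ_ne_nil rest)
        | cons a t => simp [splitQ, hs, hc]

lemma splitOn_quote (l : List Char) : PySem.Chars.splitOn l ['"'] = splitQ l := by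
  rw [PySem.Chars.splitOn, splitOn_go_quote (l.length + 1) l [] [] (by omega)]
  cases hs : splitQ l with
  | nil => exact absurd hs (splitQ_ne_nil l)
  | cons a t => simp

lemma splitQ_no_quote {l : List Char} (h : '"' ∉ l) : splitQ l = [l] := by
  induction l with
  | nil => simp [splitQ]
  | cons c r ih =>
    simp only [List.mem_cons, not_or] at h
    simp [splitQ, Ne.symm h.1, ih h.2]

lemma splitQ_decomp {p : List Char} (t : List Char) (h : '"' ∉ p) :
    splitQ (p ++ '"' :: t) = p :: splitQ t := by
  induction p with
  | nil => simp [splitQ]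
  | cons c r ih =>
    simp only [List.mem_cons, not_or] at h
    simp [splitQ, Ne.symm h.1, ih h.2]

lemma quoteStep_skip (gs : List Char) : ∀ (l : List Char) (k : Int) st,
    (∀ c ∈ l, c ≠ '"') →
    (PySem.List.enumerate l k).foldl (quoteStep gs) st = st := by
  intro l
  induction l with
  | nil => intro k st h; simp [PySem.List.enumerate]
  | cons c r ih =>
    intro k st h
    rw [PySem.List.enumerate_cons, List.foldl_cons]
    have hc : c ≠ '"' := h c (by simp)
    have : quoteStep gs st (k, c) = st := by
      simp [quoteStep, hc]
    rw [this]
    exact ih (k + 1) st (fun d hd => h d (by simp [hd]))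

lemma nameStep_frozen (s : String) (cs : List Char) :
    ∀ (l : List Nat) (st : Int × String × Bool), st.2.2 = true →
    l.foldl (nameStep s cs) st = st := by
  intro l
  induction l with
  | nil => intro st h; simp
  | cons i r ih =>
    intro st h
    rw [List.foldl_cons]
    have : nameStep s cs st i = st := by simp [nameStep, h]
    rw [this]
    exact ih st h

lemma nameStep_skip (s : String) (cs : List Char) :
    ∀ (l : List Nat),
    (∀ i ∈ l, (PySem.List.pyGet? cs (i : Int) ≠ some ' ') ∧ i ≠ cs.length - 1) →
    l.foldl (nameStep s cs) ((0 : Int), "", false) = ((0 : Int), "", false) := by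
  intro l
  induction l with
  | nil => intro h; simp
  | cons i r ih =>
    intro h
    rw [List.foldl_cons]
    have h1 := h i (by simp)
    have h2 := h1.1
    rw [PySem.List.pyGet?_natCast] at h2
    have : nameStep s cs ((0 : Int), "", false) i = ((0 : Int), "", false) := by
      simp [nameStep, h2, h1.2]
    rw [this]
    exact ih (fun j hj => h j (by simp [hj]))

lemma loopA_no_space (s : String) (cs : List Char) (h : ' ' ∉ cs) :
    (List.range cs.length).foldl (nameStep s cs) ((0 : Int), "", false)
      = (0, if cs = [] then "" else s, false) := by
  by_cases hcs : cs = []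
  · subst hcs; simp
  · have hlen : cs.length = (cs.length - 1) + 1 := by
      have := List.length_pos_of_ne_nil hcs; omega
    rw [if_neg hcs]
    rw [hlen, List.range_succ, List.foldl_append]
    rw [nameStep_skip s cs _ ?side]
    · simp only [List.foldl_cons, List.foldl_nil]
      have hget : cs[cs.length - 1]? ≠ some ' ' := by
        rw [List.getElem?_eq_getElem (by omega)]
        simp only [ne_eq, Option.some.injEq]
        intro hx
        exact h (hx ▸ List.getElem_mem _)
      simp [nameStep, hget]
    · intro i hi
      simp only [List.mem_range] at hi
      constructor
      · rw [PySem.List.pyGet?_natCast, List.getElem?_eq_getElem (by omega)]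
        intro hx
        simp only [Option.some.injEq] at hx
        exact h (hx ▸ List.getElem_mem _)
      · omega

lemma loopA_space (s : String) (cs : List Char) (p : Nat) (hp : p < cs.length)
    (hsp : cs[p] = ' ') (hmin : ∀ i (h : i < p), cs[i]'(by omega) ≠ ' ') :
    (List.range cs.length).foldl (nameStep s cs) ((0 : Int), "", false)
      = ((p : Int), String.ofList (PySem.List.slice cs none (some (p : Int))), true) := by
  have hsplit : cs.length = p + 1 + (cs.length - p - 1) := by omega
  rw [hsplit, List.range_add, List.foldl_append, List.range_succ, List.foldl_append]
  rw [nameStep_skip s cs _ ?side]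
  · rw [List.foldl_cons, List.foldl_nil]
    have hget : PySem.List.pyGet? cs ((p : Nat) : Int) = some ' ' := by
      rw [PySem.List.pyGet?_natCast, List.getElem?_eq_getElem hp, hsp]
    rw [show nameStep s cs ((0 : Int), "", false) p
        = ((p : Int), String.ofList (PySem.List.slice cs none (some (p : Int))), true) by
      simp [nameStep, hget]]
    exact nameStep_frozen s cs _ _ rfl
  · intro i hi
    simp only [List.mem_range] at hi
    refine ⟨?_, by omega⟩
    rw [PySem.List.pyGet?_natCast, List.getElem?_eq_getElem (by omega)]
    intro hx
    simp only [Option.some.injEq] at hx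
    exact hmin i hi hx


lemma slice_one_neg_one (l : List Char) :
    PySem.List.slice l (some 1) (some (-1)) = l.dropLast.drop 1 := by
  have hs : PySem.List.slice l (some 1) (some (-1))
      = List.take (PySem.List.clampIdx l.length (-1) - PySem.List.clampIdx l.length 1)
          (List.drop (PySem.List.clampIdx l.length 1) l) := rfl
  rcases Nat.eq_zero_or_pos l.length with h | h
  · have : l = [] := List.length_eq_zero_iff.mp h
    subst this; rfl
  · have hc1 : PySem.List.clampIdx l.length 1 = 1 := by
      simp only [PySem.List.clampIdx]
      rw [if_neg (by omega)]
      simp only [Int.toNat_one]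
      omega
    have hc2 : PySem.List.clampIdx l.length (-1) = l.length - 1 := by
      simp only [PySem.List.clampIdx]
      rw [if_pos (by omega), if_neg (by omega)]
      omega
    rw [hs, hc1, hc2, List.dropLast_eq_take, List.drop_take]

lemma slice_shift (gs r : List Char) (b : Nat) (hr : r = gs.drop b) (m : Nat) :
    PySem.List.slice gs (some (b : Int)) (some ((b : Int) + (m : Int))) = r.take m := by
  rw [hr, PySem.List.slice_natCast_add]

lemma slice_name_eq (gs r : List Char) (b j : Nat) (hr : r = gs.drop b) (h1 : 1 ≤ b + j)
    (hj : j ≤ r.length) :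
    PySem.List.slice gs (some ((b : Int) + 1)) (some ((b : Int) + (j : Int) - 1))
      = PySem.List.slice (r.take j) (some 1) (some (-1)) := by
  rw [slice_one_neg_one]
  have h1' : ((b : Int) + 1) = ((b + 1 : Nat) : Int) := by push_cast; ring
  have h2' : ((b : Int) + (j : Int) - 1) = ((b + j - 1 : Nat) : Int) := by push_cast [h1]; ring
  rw [h1', h2', PySem.List.slice_natCast]
  rw [List.dropLast_eq_take, List.length_take, Nat.min_eq_left hj, List.take_take,
      Nat.min_eq_left (by omega : j - 1 ≤ j), List.drop_take, hr, List.drop_drop]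
  congr 1
  omega

lemma take_findIdx_no_quote (r : List Char) :
    '"' ∉ r.take (r.findIdx (· = '"')) := by
  intro hc
  rw [List.mem_take_iff_getElem] at hc
  obtain ⟨i, hi, he⟩ := hc
  have hlt : i < r.findIdx (· = '"') := (lt_min_iff.mp hi).1
  have hnot := List.not_of_lt_findIdx hlt
  simp only [decide_eq_false_iff_not] at hnot
  exact hnot he


lemma scan (gs : List Char) : ∀ (n : Nat) (r : List Char) (b : Nat) (qs : Int)
    (acc : List (List String)),
    r.length ≤ n →
    r = gs.drop b → (b = 0 → r.head? ≠ some '"') →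
    ((PySem.List.enumerate r (b : Int)).foldl (quoteStep gs) (0, qs, (b : Int) - 1, acc, [])).2.2.2.1
      = acc ++ attrPairsB (splitQ r) := by
  intro n
  induction n with
  | zero =>
    intro r b qs acc hn hr _
    have : r = [] := List.length_eq_zero_iff.mp (by omega)
    subst this
    simp [PySem.List.enumerate, splitQ, attrPairsB]
  | succ n ih =>
    intro r b qs acc hn hr hpos
    by_cases hq : '"' ∈ r
    · -- first quote at j
      set j := r.findIdx (· = '"') with hjdef
      have hjlt : j < r.length := List.findIdx_lt_length.mpr ⟨'"', hq, by simp⟩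
      have hjget : r[j] = '"' := by
        have := List.findIdx_getElem (w := hjlt); simpa using this
      have hjget? : r[j]? = some '"' := by
        rw [List.getElem?_eq_getElem hjlt, hjget]
      have hdec : r = r.take j ++ '"' :: r.drop (j + 1) := by
        conv_lhs => rw [← List.take_append_drop j r, List.drop_eq_getElem_cons hjlt, hjget]
      have htq : '"' ∉ r.take j := take_findIdx_no_quote r
      have h1 : 1 ≤ b + j := by
        rcases Nat.eq_zero_or_pos (b + j) with hbj | hbj
        · exfalso
          apply hpos (by omega)
          rw [List.head?_eq_getElem?]
          have hj0 : j = 0 := by omega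
          rw [hj0] at hjget?
          exact hjget?
        · exact hbj
      have hlen_take : (r.take j).length = j := by simp [Nat.le_of_lt hjlt]
      -- unroll to the opening quote
      conv_lhs => rw [hdec]
      rw [PySem.List.enumerate_append, List.foldl_append,
          quoteStep_skip gs _ _ _ (fun c hc he => htq (he ▸ hc)),
          PySem.List.enumerate_cons, List.foldl_cons, hlen_take]
      set r' := r.drop (j + 1) with hr'def
      have hr' : r' = gs.drop (b + j + 1) := by
        rw [hr'def, hr, List.drop_drop, show b + (j + 1) = b + j + 1 from by omega]
      set nm := String.ofList (PySem.List.slice gs (some ((b : Int) + 1)) (some ((b : Int) + (j : Int) - 1))) with hnm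
      have hstep1 : quoteStep gs (0, qs, (b : Int) - 1, acc, []) (((b : Int) + (j : Int)), '"')
          = (1, (b : Int) + j, (b : Int) - 1, acc, [nm]) := by
        have e1 : (b : Int) - 1 + 2 = (b : Int) + 1 := by ring
        simp [quoteStep, e1]
        rw [hnm]
      rw [hstep1]
      by_cases hq' : '"' ∈ r'
      · -- closing quote at j' in r'
        set j' := r'.findIdx (· = '"') with hj'def
        have hj'lt : j' < r'.length := List.findIdx_lt_length.mpr ⟨'"', hq', by simp⟩
        have hj'get : r'[j'] = '"' := by
          have := List.findIdx_getElem (w := hj'lt); simpa using this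
        have hdec' : r' = r'.take j' ++ '"' :: r'.drop (j' + 1) := by
          conv_lhs => rw [← List.take_append_drop j' r', List.drop_eq_getElem_cons hj'lt, hj'get]
        have htq' : '"' ∉ r'.take j' := take_findIdx_no_quote r'
        have hlen_take' : (r'.take j').length = j' := by simp [Nat.le_of_lt hj'lt]
        conv_lhs => rw [hdec']
        rw [PySem.List.enumerate_append, List.foldl_append,
            quoteStep_skip gs _ _ _ (fun c hc he => htq' (he ▸ hc)),
            PySem.List.enumerate_cons, List.foldl_cons, hlen_take']
        set vl := String.ofList (PySem.List.slice gs (some ((b : Int) + j + 1)) (some ((b : Int) + j + 1 + j'))) with hvl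
        have hstep2 : quoteStep gs (1, (b : Int) + j, (b : Int) - 1, acc, [nm])
            (((b : Int) + j + 1 + (j' : Int)), '"')
            = (0, (b : Int) + j, (b : Int) + j + 1 + j', acc ++ [[nm, vl]], []) := by
          norm_num [quoteStep]
          rw [hvl]
        rw [hstep2]
        -- recursive call
        have hr'' : r'.drop (j' + 1) = gs.drop (b + j + 1 + j' + 1) := by
          rw [hr', List.drop_drop, show b + j + 1 + (j' + 1) = b + j + 1 + j' + 1 from by omega]
        have hcast : ((b : Int) + j + 1 + j') = ((b + j + 1 + j' + 1 : Nat) : Int) - 1 := by push_cast; ring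
        rw [hcast,
            show ((b + j + 1 + j' + 1 : Nat) : Int) - 1 + 1 = ((b + j + 1 + j' + 1 : Nat) : Int) from by ring]
        rw [ih (r'.drop (j' + 1)) (b + j + 1 + j' + 1) ((b : Int) + j) _
            (by rw [hr'def]; simp only [List.length_drop]; omega)
            hr'' (by omega)]
        -- now the split side
        have hsplit : splitQ r = r.take j :: r'.take j' :: splitQ (r'.drop (j' + 1)) := by
          conv_lhs => rw [hdec, hdec']
          rw [splitQ_decomp _ htq, splitQ_decomp _ htq']
        rw [hsplit]
        cases hs : splitQ (r'.drop (j' + 1)) with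
        | nil => exact absurd hs (splitQ_ne_nil _)
        | cons a t =>
          simp only [attrPairsB, List.append_assoc, List.singleton_append]
          congr 3
          · rw [hnm, slice_name_eq gs r b j hr h1 (Nat.le_of_lt hjlt)]
          · rw [hvl]
            have hss := slice_shift gs r' (b + j + 1) hr' j'
            have ha : ((b + j + 1 : Nat) : Int) = (b : Int) + j + 1 := by push_cast; ring
            rw [ha] at hss
            rw [show (b : Int) + j + 1 + (j' : Int) = (b : Int) + j + 1 + (j' : Int) from rfl, hss]
      · -- no closing quote: state machine never closes, attrs stays acc
        rw [quoteStep_skip gs _ _ _ (fun c hc he => hq' (he ▸ hc))]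
        have hsplit : splitQ r = r.take j :: splitQ r' := by
          conv_lhs => rw [hdec]
          exact splitQ_decomp _ htq
        rw [hsplit, splitQ_no_quote hq']
        simp [attrPairsB]
    · -- no quote at all
      rw [quoteStep_skip gs _ _ _ (fun c hc he => hq (he ▸ hc)), splitQ_no_quote hq]
      simp [attrPairsB]

-- singleton prefix gives the head character
lemma singleton_prefix_head {l : List Char} {c : Char} (h : [c] <+: l) : l.head? = some c := by
  obtain ⟨t, rfl⟩ := h; rfl

lemma drop_head? (l : List Char) (i : Nat) (h : i < l.length) : (l.drop i).head? = some l[i] := by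
  rw [List.drop_eq_getElem_cons h]; rfl

-- the open/self-close body of A equals the open/self-close body of B, for any tag string
lemma main_eq (s : String) (tag : String) :
    (let cs := s.toList
     let st := (List.range cs.length).foldl (nameStep s cs) ((0 : Int), "", false)
     let component_name := convert_kebab_to_pascal st.2.1
     if st.1 = 0 then (component_name, tag, none)
     else
       let attr_string := PySem.List.slice cs (some st.1) none
       let res := (PySem.List.enumerate attr_string 0).foldl (quoteStep attr_string) (0, 0, -1, [], [])
       (component_name, tag, some res.2.2.2.1)
     : String × String × Option (List (List String)))
    = (let idx := PySem.Str.find s " "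
       if idx = 0 then ("", tag, none)
       else if idx = -1 then (convert_kebab_to_pascal s, tag, none)
       else
         let cs := s.toList
         let name := convert_kebab_to_pascal (String.ofList (PySem.List.slice cs none (some idx)))
         let segments := (PySem.Chars.split? (PySem.List.slice cs (some idx) none) ['"']).getD []
         (name, tag, some (attrPairsB segments))) := by
  simp only []
  have hF : PySem.Str.find s " " = PySem.Chars.find s.toList [' '] := by
    rw [PySem.Str.find_eq]
    rfl
  rw [hF]
  set cs := s.toList with hcsdef
  by_cases hneg : PySem.Chars.find cs [' '] = -1
  · -- no space anywhere
    have hnos : ' ' ∉ cs := by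
      intro hmem
      exact (PySem.Chars.find_eq_neg_one_iff _ _).mp hneg
        ((List.singleton_infix_iff _ _).mpr hmem)
    rw [loopA_no_space s cs hnos, hneg]
    have hname : (if cs = [] then "" else s) = s := by
      by_cases hnil : cs = []
      · rw [if_pos hnil]
        have hs0 : "".toList = s.toList := by rw [← hcsdef, hnil]; rfl
        exact String.toList_inj.mp hs0
      · rw [if_neg hnil]
    rw [hname,
        if_pos (show (0 : Int) = 0 from rfl),
        if_neg (show ¬((-1 : Int) = 0) from by decide),
        if_pos (show (-1 : Int) = (-1 : Int) from rfl)]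
  · -- first space at p
    have hge : (0 : Int) ≤ PySem.Chars.find cs [' '] := by
      have := PySem.Chars.neg_one_le_find cs [' ']
      omega
    obtain ⟨hpre, hmin⟩ := PySem.Chars.find_spec (s := cs) (sub := [' ']) hge
    set p := (PySem.Chars.find cs [' ']).toNat with hpdef
    have hFp : PySem.Chars.find cs [' '] = (p : Int) := (Int.toNat_of_nonneg hge).symm
    have hplen : p < cs.length := by
      by_contra hcon
      rw [not_lt] at hcon
      rw [List.drop_eq_nil_of_le hcon] at hpre
      simp at hpre
    have hchar : cs[p] = ' ' := by
      have h2 := singleton_prefix_head hpre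
      rw [drop_head? _ _ hplen] at h2
      exact (Option.some.injEq _ _).mp h2
    have hmin' : ∀ i (h : i < p), cs[i]'(by omega) ≠ ' ' := by
      intro i hi hx
      apply hmin i hi
      rw [List.drop_eq_getElem_cons (by omega : i < cs.length), hx]
      exact ⟨_, rfl⟩
    rw [loopA_space s cs p hplen hchar hmin', hFp]
    by_cases hp0 : p = 0
    · rw [hp0]
      rw [if_pos (show ((0 : Nat) : Int) = 0 from by norm_num),
          if_pos (show ((0 : Nat) : Int) = 0 from by norm_num)]
      have hsl : PySem.List.slice cs none (some ((0 : Nat) : Int)) = [] := by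
        rw [PySem.List.slice_to_natCast]
        simp
      rw [hsl]
      rfl
    · rw [if_neg (show ¬(((p : Nat) : Int) = 0) from by exact_mod_cast hp0),
          if_neg (show ¬(((p : Nat) : Int) = 0) from by exact_mod_cast hp0),
          if_neg (show ¬(((p : Nat) : Int) = -1) from by omega)]
      rw [PySem.List.slice_from_natCast]
      have hsplitseg : (PySem.Chars.split? (cs.drop p) ['"']).getD [] = splitQ (cs.drop p) := by
        rw [PySem.Chars.split?]
        simp [splitOn_quote]
      rw [hsplitseg]
      have hscan := scan (cs.drop p) (cs.drop p).length (cs.drop p) 0 0 []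
        le_rfl List.drop_zero.symm
        (by
          intro _ hhead
          rw [drop_head? _ _ hplen, hchar] at hhead
          simp at hhead)
      rw [Nat.cast_zero] at hscan
      rw [show ((-1 : Int)) = (0 : Int) - 1 from by ring, hscan]
      rfl

-- ===== VERDICT (by name: the statement is the Claim_ definition above) =====
theorem parse_spec : Claim_equal_parse := by
  unfold Claim_equal_parse Spec_parse
  intro s _
  unfold parse parse_alt
  simp only []
  by_cases hsw : PySem.Str.startswith s "/" = true
  · rw [if_pos hsw, if_pos rfl]
    rfl
  · rw [if_neg hsw]
    by_cases hew : PySem.Str.endswith s "/" = true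
    · rw [if_pos hew, if_neg (show ¬("self-close" = "close") from by decide)]
      exact main_eq s "self-close"
    · rw [if_neg hew, if_neg (show ¬("open" = "close") from by decide)]
      exact main_eq s "open"
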